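-- pv_equiv track=rewrite | github.com/ZidongLiu/python-performance-test | tests/exception_test.py | exception_handling_test
-- ===== SOURCE A (Python) =====
-- def exception_handling_test(iterations: int) -> int:
--     """
--     Test exception handling performance.
--
--     Args:
--         iterations: Number of iterations to run
--
--     Returns:
--         Accumulated result from exception handling
--     """
--     result = 0
--     for i in range(iterations):
--         try:
--             if i % 2 == 0:
--                 raise ValueError("Even number")
--             result += i
--         except ValueError:
--             result += i * 2
--         finally:
--             result += 1
--
--     return result
-- ===== SOURCE B (Python) =====
-- def exception_handling_test(iterations: int) -> int:
--     # Closed form: even i contribute 2*i+1, odd i contribute i+1.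
--     if iterations <= 0:
--         return 0
--     e = (iterations + 1) // 2   # number of even i in range(iterations)
--     o = iterations // 2         # number of odd i
--     return 2 * e * (e - 1) + o * o + iterations
-- ===== Notes on version B (the rewrite author's own statement) =====
-- stated objective: faster
-- what changed: Replaces the per-iteration try/except loop with a closed-form arithmetic formula for the sums of the even and odd contributions.
import Mathlib
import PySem

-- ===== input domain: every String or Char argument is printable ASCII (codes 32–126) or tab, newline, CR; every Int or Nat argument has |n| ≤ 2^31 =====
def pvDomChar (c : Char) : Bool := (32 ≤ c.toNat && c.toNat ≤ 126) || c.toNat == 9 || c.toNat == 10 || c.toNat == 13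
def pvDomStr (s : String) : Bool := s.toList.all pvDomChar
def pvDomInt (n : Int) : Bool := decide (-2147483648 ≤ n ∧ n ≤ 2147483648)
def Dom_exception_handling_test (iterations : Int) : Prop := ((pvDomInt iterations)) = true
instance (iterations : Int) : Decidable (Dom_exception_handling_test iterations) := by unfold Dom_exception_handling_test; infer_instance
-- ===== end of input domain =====

-- B replaces A's per-iteration try/except loop by a closed-form arithmetic formula (faster).

-- ===== PORT A =====
-- literal port: for i in range(iterations): even i add i*2+1, odd i add i+1
def exception_handling_test (iterations : Int) : Int :=
  (PySem.List.pyRange 0 iterations 1).foldl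
    (fun result i => if PySem.Int.mod i 2 == 0 then result + i * 2 + 1 else result + i + 1) 0

-- ===== PORT B =====
def exception_handling_test_alt (iterations : Int) : Int :=
  if iterations ≤ 0 then 0
  else
    let e := PySem.Int.floordiv (iterations + 1) 2
    let o := PySem.Int.floordiv iterations 2
    2 * e * (e - 1) + o * o + iterations

-- ===== PRECONDITION & SPEC =====
def Spec_exception_handling_test (iterations : Int) (out : Int) : Prop := out = exception_handling_test_alt iterations
instance (iterations : Int) (out : Int) : Decidable (Spec_exception_handling_test iterations out) := by unfold Spec_exception_handling_test; infer_instance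

-- ===== CLAIM (what is proved, stated in full; the proofs are below) =====
def Claim_equal_exception_handling_test : Prop := ∀ (iterations : Int), Dom_exception_handling_test iterations → Spec_exception_handling_test iterations (exception_handling_test iterations)

-- ===== LEMMAS AND PROOFS =====

def pvF (n : Nat) : Int :=
  2 * (((n + 1) / 2 : Nat) : Int) * ((((n + 1) / 2 : Nat) : Int) - 1)
    + ((n / 2 : Nat) : Int) * ((n / 2 : Nat) : Int) + n

lemma pv_fold (n : Nat) (acc : Int) :
    (PySem.List.pyRange 0 (n : Int) 1).foldl
      (fun result i => if PySem.Int.mod i 2 == 0 then result + i * 2 + 1 else result + i + 1) acc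
    = acc + pvF n := by
  induction n generalizing acc with
  | zero => simp [PySem.List.pyRange_one_eq_nil (by omega : (0:Int) ≤ 0), pvF]
  | succ n ih =>
    have hcast : ((n + 1 : Nat) : Int) = (n : Int) + 1 := by push_cast; ring
    rw [hcast, PySem.List.pyRange_one_succ_right (by positivity), List.foldl_append, ih]
    simp only [List.foldl_cons, List.foldl_nil]
    have hmod : PySem.Int.mod (n : Int) 2 = ((n % 2 : Nat) : Int) := by
      exact_mod_cast PySem.Int.mod_natCast n 2
    rcases Nat.even_or_odd n with ⟨k, hk⟩ | ⟨k, hk⟩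
    · have h1 : n % 2 = 0 := by omega
      have h2 : n / 2 = k := by omega
      have h3 : (n + 1) / 2 = k := by omega
      have h4 : (n + 1 + 1) / 2 = k + 1 := by omega
      
      rw [hmod, h1]
      simp only [Nat.cast_zero, beq_self_eq_true, if_true, pvF, h2, h3, h4]
      subst hk
      push_cast
      ring
    · have h1 : n % 2 = 1 := by omega
      have h2 : n / 2 = k := by omega
      have h3 : (n + 1) / 2 = k + 1 := by omega
      have h4 : (n + 1 + 1) / 2 = k + 1 := by omega
      
      rw [hmod, h1]
      norm_num
      simp only [pvF, h2, h3, h4]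
      subst hk
      push_cast
      ring

-- ===== VERDICT (by name: the statement is the Claim_ definition above) =====
theorem exception_handling_test_spec : Claim_equal_exception_handling_test := by
  intro iterations _
  unfold Spec_exception_handling_test exception_handling_test exception_handling_test_alt
  by_cases h : iterations ≤ 0
  · simp [PySem.List.pyRange_one_eq_nil h, h]
  · rw [not_le] at h
    obtain ⟨n, rfl⟩ : ∃ n : Nat, iterations = (n : Int) :=
      ⟨iterations.toNat, (Int.toNat_of_nonneg (by omega)).symm⟩
    rw [pv_fold n 0]
    have hne : ¬ ((n : Int) ≤ 0) := by omega
    simp only [hne, if_false]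
    have he : PySem.Int.floordiv ((n : Int) + 1) 2 = (((n + 1) / 2 : Nat) : Int) := by
      have := PySem.Int.floordiv_natCast (n + 1) 2
      push_cast at this ⊢
      exact_mod_cast this
    have ho : PySem.Int.floordiv (n : Int) 2 = ((n / 2 : Nat) : Int) := by
      exact_mod_cast PySem.Int.floordiv_natCast n 2
    rw [he, ho]
    simp [pvF]
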